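-- pv_equiv track=rewrite | github.com/CatilonyZhang/CriticGPT-Lean | math_tree/autoformalizer/autoformalizer/data_utils/negate_theorem.py | extract_theorem_lines
-- ===== SOURCE A (Python) =====
-- def extract_theorem_lines(text: str) -> list[str]:
--     """
--     Extracts lines containing the theorem definition from input text.
--
--     Args:
--         text (str): The input text containing the theorem
--
--     Returns:
--         list[str]: Lines containing the theorem definition
--     """
--     theorem_lines = []
--     lib_lines = []
--     in_theorem = False
--
--     for line in text.strip().split('\n'):
--         line = line.strip()
--         if line.startswith('theorem'):
--             in_theorem = True
--         if in_theorem: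
--             theorem_lines.append(line)
--         else:
--             lib_lines.append(line)
--
--     return lib_lines, theorem_lines
-- ===== SOURCE B (Python) =====
-- def extract_theorem_lines(text: str) -> list[str]:
--     lines = [l.strip() for l in text.strip().split('\n')]
--     i = next((k for k, l in enumerate(lines) if l.startswith('theorem')), len(lines))
--     return lines[:i], lines[i:]
-- ===== Notes on version B (the rewrite author's own statement) =====
-- stated objective: simpler
-- what changed: Replaces the per-line boolean flag and two accumulator lists with computing the pivot index of the first theorem-keyword line once and slicing the stripped line list into the two parts.
import Mathlib
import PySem

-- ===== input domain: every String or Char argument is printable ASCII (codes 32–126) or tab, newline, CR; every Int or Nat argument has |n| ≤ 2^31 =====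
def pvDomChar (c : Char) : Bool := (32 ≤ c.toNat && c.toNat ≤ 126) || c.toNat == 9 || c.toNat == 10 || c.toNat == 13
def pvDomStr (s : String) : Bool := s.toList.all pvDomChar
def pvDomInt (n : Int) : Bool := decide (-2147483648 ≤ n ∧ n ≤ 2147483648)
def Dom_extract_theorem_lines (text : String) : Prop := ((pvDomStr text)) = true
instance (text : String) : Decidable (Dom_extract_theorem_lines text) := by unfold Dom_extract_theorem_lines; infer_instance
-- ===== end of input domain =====

-- B computes the split index once and slices, instead of A's per-line flag with two accumulators; same O(n), simpler decomposition.
-- ===== PORT A =====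
def pvStepA (st : List String × List String × Bool) (line : String) : List String × List String × Bool :=
  let line := PySem.Str.strip line
  let in_theorem := st.2.2 || PySem.Str.startswith line "theorem"
  if in_theorem then (st.1, st.2.1 ++ [line], in_theorem)
  else (st.1 ++ [line], st.2.1, in_theorem)

def extract_theorem_lines (text : String) : List String × List String :=
  let st := (((PySem.Str.split? (PySem.Str.strip text) "\n").getD []).foldl pvStepA ([], [], false))
  (st.1, st.2.1)

-- ===== PORT B =====
def extract_theorem_lines_alt (text : String) : List String × List String :=
  let lines := ((PySem.Str.split? (PySem.Str.strip text) "\n").getD []).map PySem.Str.strip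
  let i := lines.findIdx (fun l => PySem.Str.startswith l "theorem")   -- next(..., default len(lines)): findIdx is length when no match
  (lines.take i, lines.drop i)

-- ===== PRECONDITION & SPEC =====
def Spec_extract_theorem_lines (text : String) (out : List String × List String) : Prop := out = extract_theorem_lines_alt text
instance (text : String) (out : List String × List String) : Decidable (Spec_extract_theorem_lines text out) := by unfold Spec_extract_theorem_lines; infer_instance

-- ===== CLAIM (what is proved, stated in full; the proofs are below) =====
def Claim_equal_extract_theorem_lines : Prop := ∀ (text : String), Dom_extract_theorem_lines text → Spec_extract_theorem_lines text (extract_theorem_lines text)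

-- ===== LEMMAS AND PROOFS =====

lemma pvFoldA_true (ls : List String) (lib thm : List String) :
    ls.foldl pvStepA (lib, thm, true) = (lib, thm ++ ls.map PySem.Str.strip, true) := by
  induction ls generalizing thm with
  | nil => simp
  | cons a t ih => simp [pvStepA, ih]

lemma pvFoldA_false (ls : List String) (lib : List String) :
    ls.foldl pvStepA (lib, [], false) =
      (lib ++ (ls.map PySem.Str.strip).take
          ((ls.map PySem.Str.strip).findIdx (fun l => PySem.Str.startswith l "theorem")),
       (ls.map PySem.Str.strip).drop
          ((ls.map PySem.Str.strip).findIdx (fun l => PySem.Str.startswith l "theorem")),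
       decide (∃ l ∈ ls.map PySem.Str.strip, PySem.Str.startswith l "theorem" = true)) := by
  induction ls generalizing lib with
  | nil => simp
  | cons a t ih =>
    by_cases h : PySem.Str.startswith (PySem.Str.strip a) "theorem" = true
    · have h' : PySem.Chars.startswith (PySem.Chars.strip a.toList) ['t','h','e','o','r','e','m'] = true := by
        simpa using h
      simp [pvStepA, h', pvFoldA_true, List.findIdx_cons]
    · have h' : PySem.Chars.startswith (PySem.Chars.strip a.toList) ['t','h','e','o','r','e','m'] = false := by
        rcases hb : PySem.Chars.startswith (PySem.Chars.strip a.toList) ['t','h','e','o','r','e','m'] with _ | _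
        · rfl
        · exact absurd (by simpa using hb) h
      simp only [List.foldl_cons]
      have e : pvStepA (lib, [], false) a = (lib ++ [PySem.Str.strip a], [], PySem.Str.startswith (PySem.Str.strip a) "theorem") := by
        simp [pvStepA, h']
      rw [e]
      have e2 : PySem.Str.startswith (PySem.Str.strip a) "theorem" = false := by
        simpa using h'
      rw [e2, ih]
      simp [List.findIdx_cons, h']

-- ===== VERDICT (by name: the statement is the Claim_ definition above) =====
theorem extract_theorem_lines_spec : Claim_equal_extract_theorem_lines := by
  intro text _
  unfold Spec_extract_theorem_lines extract_theorem_lines extract_theorem_lines_alt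
  rw [pvFoldA_false]
  simp
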